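-- pv_equiv track=rewrite | github.com/tbfreitas/trabalho-sma | src/autonomo/comport_seg.py | decideMelhorCaminho
-- ===== SOURCE A (Python) =====
-- def decideMelhorCaminho(disp):
--
--     maior = []
--     indexesMaior = 0
--     for d in disp:
--         if d[0] + d[1] > indexesMaior:
--             indexesMaior = d[0] + d[1]
--             maior = d
--
--     return maior
-- ===== SOURCE B (Python) =====
-- def decideMelhorCaminho(disp):
--     ordenado = sorted(disp, key=lambda d: d[0] + d[1], reverse=True)
--     if ordenado and ordenado[0][0] + ordenado[0][1] > 0:
--         return ordenado[0]
--     return []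
-- ===== Notes on version B (the rewrite author's own statement) =====
-- stated objective: alternative
-- what changed: Replaces the running-max accumulator loop with a stable descending sort by d[0]+d[1] followed by inspecting the head element (reverse=True stability keeps the first of tied maxima), keeping the >0 threshold as a final check.
-- outside the precondition, e.g. on decideMelhorCaminho([]): A returns (), B returns (); on decideMelhorCaminho([(0, -1), (-2, 1)]): A returns (), B returns ()
import Mathlib
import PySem

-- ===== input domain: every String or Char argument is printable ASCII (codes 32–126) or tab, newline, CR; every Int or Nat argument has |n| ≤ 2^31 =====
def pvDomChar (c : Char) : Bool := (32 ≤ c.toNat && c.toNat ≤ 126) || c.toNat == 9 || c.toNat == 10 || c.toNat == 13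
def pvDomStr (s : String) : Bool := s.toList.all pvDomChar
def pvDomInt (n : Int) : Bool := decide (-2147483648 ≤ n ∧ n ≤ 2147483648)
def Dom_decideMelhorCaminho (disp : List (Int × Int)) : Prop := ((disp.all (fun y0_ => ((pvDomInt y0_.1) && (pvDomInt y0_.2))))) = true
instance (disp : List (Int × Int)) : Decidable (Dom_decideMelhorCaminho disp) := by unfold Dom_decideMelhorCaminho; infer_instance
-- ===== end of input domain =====

-- B replaces A's running-max accumulator loop by a stable descending sort on d.1+d.2 followed by a head inspection (alternative decomposition, not faster).
-- Python A returns the empty list [] (not an int pair) when disp is empty or no element has positive sum; both ports return (0,0) there, but Pre_ excludes those inputs since A's value leaves the declared type.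


-- ===== PORT A =====
-- maior = [] / indexesMaior = 0; the running state is (maior : Option, indexesMaior).
-- Under Pre_ the final maior is `some`; the `.getD (0,0)` default is only reached outside Pre_, where Python A returns [].
def decideMelhorCaminho (disp : List (Int × Int)) : Int × Int :=
  (disp.foldl
    (fun (st : Option (Int × Int) × Int) d =>
      if d.1 + d.2 > st.2 then (some d, d.1 + d.2) else st)
    (none, 0)).1.getD (0, 0)

-- ===== PORT B =====
-- sorted(disp, key=lambda d: d[0]+d[1], reverse=True); head if its sum > 0, else [] (ported as the (0,0) default, only outside Pre_).
def decideMelhorCaminho_alt (disp : List (Int × Int)) : Int × Int :=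
  match PySem.List.sorted disp (fun d => d.1 + d.2) true with
  | [] => (0, 0)
  | m :: _ => if m.1 + m.2 > 0 then m else (0, 0)

-- ===== PRECONDITION & SPEC =====
-- Pre_ excludes exactly the inputs (empty list / every d.1+d.2 ≤ 0) on which Python A returns the empty list [], which is not a value of the declared pair type; B returns [] there too.
def Pre_decideMelhorCaminho (disp : List (Int × Int)) : Prop := ∃ d ∈ disp, 0 < d.1 + d.2
instance (disp : List (Int × Int)) : Decidable (Pre_decideMelhorCaminho disp) := by unfold Pre_decideMelhorCaminho; infer_instance
def pvWitness_decideMelhorCaminho : (List (Int × Int)) := [(1, 1)]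
def Spec_decideMelhorCaminho (disp : List (Int × Int)) (out : Int × Int) : Prop := out = decideMelhorCaminho_alt disp
instance (disp : List (Int × Int)) (out : Int × Int) : Decidable (Spec_decideMelhorCaminho disp out) := by unfold Spec_decideMelhorCaminho; infer_instance

-- ===== CLAIM (what is proved, stated in full; the proofs are below) =====
def Claim_equal_decideMelhorCaminho : Prop := ∀ (disp : List (Int × Int)), Dom_decideMelhorCaminho disp → Pre_decideMelhorCaminho disp → Spec_decideMelhorCaminho disp (decideMelhorCaminho disp)

-- ===== LEMMAS AND PROOFS =====

-- A's loop step and the sum key, named for the proofs.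
def pvStep (st : Option (Int × Int) × Int) (d : Int × Int) : Option (Int × Int) × Int :=
  if d.1 + d.2 > st.2 then (some d, d.1 + d.2) else st

def pvKey (d : Int × Int) : Int := d.1 + d.2

-- Relation between the sorted accumulator (its head) and A's running state.
def pvInv (acc : List (Int × Int)) (st : Option (Int × Int) × Int) : Prop :=
  match acc with
  | [] => st = (none, 0)
  | h :: _ => (0 < pvKey h → st = (some h, pvKey h)) ∧ (pvKey h ≤ 0 → st = (none, 0))

-- head of insertBy: the new element goes in front iff it beats the old head.
theorem pvInsert_head (d h : Int × Int) (ys : List (Int × Int)) :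
    PySem.List.insertBy (fun a b => decide (pvKey b < pvKey a)) d (h :: ys) =
      if pvKey h < pvKey d then d :: h :: ys
      else h :: PySem.List.insertBy (fun a b => decide (pvKey b < pvKey a)) d ys := by
  simp [PySem.List.insertBy]

theorem pvInv_step (acc : List (Int × Int)) (st : Option (Int × Int) × Int)
    (d : Int × Int) (h : pvInv acc st) :
    pvInv (PySem.List.insertBy (fun a b => decide (pvKey b < pvKey a)) d acc) (pvStep st d) := by
  cases acc with
  | nil =>
      simp only [pvInv] at h
      subst h
      simp only [PySem.List.insertBy, pvInv, pvStep, pvKey]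
      constructor <;> intro h1 <;> simp_all
  | cons x xs =>
      obtain ⟨hpos, hneg⟩ := h
      rw [pvInsert_head]
      by_cases hx : 0 < pvKey x
      · have hst := hpos hx; subst hst
        by_cases hlt : pvKey x < pvKey d
        · rw [if_pos hlt]
          simp only [pvInv]
          constructor <;> intro h1 <;> simp only [pvStep, pvKey] at * <;> simp_all <;> omega
        · rw [if_neg hlt]
          simp only [pvInv]
          constructor <;> intro h1 <;> simp only [pvStep, pvKey] at * <;> simp_all
      · have hst := hneg (by omega); subst hst
        by_cases hlt : pvKey x < pvKey d
        · rw [if_pos hlt]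
          simp only [pvInv]
          constructor <;> intro h1 <;> simp only [pvStep, pvKey] at * <;> simp_all <;> omega
        · rw [if_neg hlt]
          simp only [pvInv]
          constructor <;> intro h1 <;> simp only [pvStep, pvKey] at * <;> simp_all <;> omega

theorem pvInv_foldl (xs : List (Int × Int)) :
    ∀ (acc : List (Int × Int)) (st : Option (Int × Int) × Int), pvInv acc st →
      pvInv (xs.foldl (fun a x => PySem.List.insertBy (fun a b => decide (pvKey b < pvKey a)) x a) acc)
            (xs.foldl pvStep st) := by
  induction xs with
  | nil => intro acc st h; simpa using h
  | cons x t ih =>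
      intro acc st h
      simp only [List.foldl_cons]
      exact ih _ _ (pvInv_step acc st x h)

theorem pvSorted_eq_foldl (disp : List (Int × Int)) :
    PySem.List.sorted disp (fun d => d.1 + d.2) true =
      disp.foldl (fun a x => PySem.List.insertBy (fun a b => decide (pvKey b < pvKey a)) x a) [] := rfl

-- ===== VERDICT (by name: the statement is the Claim_ definition above) =====
theorem decideMelhorCaminho_spec : Claim_equal_decideMelhorCaminho := by
  intro disp _ hpre
  unfold Spec_decideMelhorCaminho decideMelhorCaminho decideMelhorCaminho_alt
  have hinv := pvInv_foldl disp [] (none, 0) (by simp [pvInv])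
  rw [← pvSorted_eq_foldl] at hinv
  have hstep : (fun (st : Option (Int × Int) × Int) d =>
      if d.1 + d.2 > st.2 then (some d, d.1 + d.2) else st) = pvStep := rfl
  rw [hstep]
  obtain ⟨w, hw, hwpos⟩ := hpre
  cases hs : PySem.List.sorted disp (fun d => d.1 + d.2) true with
  | nil =>
      exfalso
      have := (PySem.List.sorted_eq_nil_iff (xs := disp) (key := fun d => d.1 + d.2) (rev := true)).mp hs
      simp [this] at hw
  | cons m t =>
      rw [hs] at hinv
      have hmax : w.1 + w.2 ≤ m.1 + m.2 := by
        simpa using PySem.List.key_head_sorted_rev_ge (xs := disp) (key := fun d => d.1 + d.2) hs w hw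
      have hmpos : 0 < pvKey m := by simp only [pvKey]; omega
      obtain ⟨hpos, _⟩ := hinv
      rw [hpos hmpos]
      simp [pvKey] at hmpos
      simp [hmpos]
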